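-- pv_equiv track=rewrite | github.com/ravikaravadara/PYTHON-ALL-CODE-SEM-2 | PYTHON lab 3/string problem   (5).py | count_alphabets_digits
-- ===== SOURCE A (Python) =====
-- def count_alphabets_digits(input_string):
--
--
--     alphabet_count = 0
--     digit_count = 0
--
--     for char in input_string:
--         if 'a' <= char <= 'z' or 'A' <= char <= 'Z':
--             alphabet_count += 1
--         elif '0' <= char <= '9':
--             digit_count += 1
--
--     return alphabet_count, digit_count
-- ===== SOURCE B (Python) =====
-- def count_alphabets_digits(input_string):
--     # Build a character-frequency table in one pass, then sum the counts of the
--     # distinct characters falling in each ASCII range (the ranges are disjoint,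
--     # so no elif chain is needed).
--     counts = {}
--     for char in input_string:
--         counts[char] = counts.get(char, 0) + 1
--     alphabet_count = sum(n for c, n in counts.items()
--                          if 'a' <= c <= 'z' or 'A' <= c <= 'Z')
--     digit_count = sum(n for c, n in counts.items() if '0' <= c <= '9')
--     return alphabet_count, digit_count
-- ===== Notes on version B (the rewrite author's own statement) =====
-- stated objective: alternative
-- what changed: B first builds a character-frequency table over the whole string, then classifies only the distinct characters (same ASCII-range comparisons), adding each character's whole count at once, instead of A's per-character increment loop.
import Mathlib
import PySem

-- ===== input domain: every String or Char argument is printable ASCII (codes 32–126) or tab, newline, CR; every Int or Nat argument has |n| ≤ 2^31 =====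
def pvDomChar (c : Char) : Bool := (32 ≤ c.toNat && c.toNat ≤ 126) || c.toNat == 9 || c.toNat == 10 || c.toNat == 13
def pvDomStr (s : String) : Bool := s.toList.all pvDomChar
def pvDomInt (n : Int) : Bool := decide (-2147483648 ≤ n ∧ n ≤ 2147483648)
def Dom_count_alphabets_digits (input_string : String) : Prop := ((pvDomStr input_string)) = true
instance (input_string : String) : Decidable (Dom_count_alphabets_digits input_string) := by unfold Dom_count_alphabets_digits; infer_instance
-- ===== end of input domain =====

-- B builds a character-frequency table in one pass and then classifies only the
-- distinct characters (same ASCII-range tests), adding each whole count at once;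
-- an alternative traversal shape, not claimed faster.

-- ===== PORT A =====
-- the shared range tests 'a' <= c <= 'z' or 'A' <= c <= 'Z'  /  '0' <= c <= '9'
def pvIsAl (c : Char) : Bool := ('a' ≤ c && c ≤ 'z') || ('A' ≤ c && c ≤ 'Z')
def pvIsDig (c : Char) : Bool := ('0' ≤ c && c ≤ '9')

def count_alphabets_digits (input_string : String) : Int × Int :=
  input_string.toList.foldl
    (fun (acc : Int × Int) char =>
      if pvIsAl char then (acc.1 + 1, acc.2)
      else if pvIsDig char then (acc.1, acc.2 + 1)
      else acc)
    (0, 0)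

-- ===== PORT B =====
def count_alphabets_digits_alt (input_string : String) : Int × Int :=
  let counts : PySem.Dict Char Int :=
    input_string.toList.foldl (fun d char => d.insert char (d.getD char 0 + 1)) PySem.Dict.empty
  let alphabet_count := ((counts.items.filter (fun kv => pvIsAl kv.1)).map (fun kv => kv.2)).sum
  let digit_count := ((counts.items.filter (fun kv => pvIsDig kv.1)).map (fun kv => kv.2)).sum
  (alphabet_count, digit_count)

-- ===== PRECONDITION & SPEC =====
def Spec_count_alphabets_digits (input_string : String) (out : Int × Int) : Prop := out = count_alphabets_digits_alt input_string
instance (input_string : String) (out : Int × Int) : Decidable (Spec_count_alphabets_digits input_string out) := by unfold Spec_count_alphabets_digits; infer_instance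

-- ===== CLAIM (what is proved, stated in full; the proofs are below) =====
def Claim_equal_count_alphabets_digits : Prop := ∀ (input_string : String), Dom_count_alphabets_digits input_string → Spec_count_alphabets_digits input_string (count_alphabets_digits input_string)

-- ===== LEMMAS AND PROOFS =====

-- A's loop computes the two countP's of the character list.
theorem foldA_eq (xs : List Char) (acc : Int × Int) :
    xs.foldl
      (fun (acc : Int × Int) char =>
        if pvIsAl char then (acc.1 + 1, acc.2)
        else if pvIsDig char then (acc.1, acc.2 + 1)
        else acc) acc
    = (acc.1 + (xs.countP pvIsAl : Int),
       acc.2 + (xs.countP (fun c => !pvIsAl c && pvIsDig c) : Int)) := by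
  induction xs generalizing acc with
  | nil => simp
  | cons c xs ih =>
    simp only [List.foldl_cons, List.countP_cons, ih]
    by_cases hA : pvIsAl c
    · (simp [hA]; omega)
    · by_cases hD : pvIsDig c
      · (simp [hA, hD]; omega)
      · simp [hA, hD]

-- sum of (if k == x then 1 else 0) over a nodup list
theorem sum_ind (x : Char) (m : List Char) (hm : m.Nodup) :
    ((m.map (fun k => if k == x then (1 : Int) else 0)).sum)
      = if x ∈ m then (1 : Int) else 0 := by
  induction m with
  | nil => simp
  | cons a m ih =>
    rcases List.nodup_cons.mp hm with ⟨ha, hm'⟩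
    by_cases hax : a = x
    · subst hax
      have h0 : ((m.map (fun k => if k = a then (1 : Int) else 0)).sum) = 0 := by
        apply List.sum_eq_zero
        intro b hb
        rcases List.mem_map.mp hb with ⟨k, hk, rfl⟩
        have hka : k ≠ a := fun h => ha (h ▸ hk)
        simp [hka]
      simp [ha]
      exact h0
    · have hx : (a == x) = false := by simp [hax]
      simp only [List.map_cons, List.sum_cons, hx, ih hm',
        List.mem_cons]
      simp [Ne.symm hax]

-- summing xs.count k over the p-filtered members of a nodup superset l of xs
-- gives xs.countP p
theorem sum_count (p : Char → Bool) (l xs : List Char) (hl : l.Nodup)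
    (hsub : ∀ x ∈ xs, x ∈ l) :
    (((l.filter p).map (fun k => (xs.count k : Int))).sum) = (xs.countP p : Int) := by
  induction xs with
  | nil =>
    rw [List.sum_eq_zero]
    · simp
    · intro a ha
      rcases List.mem_map.mp ha with ⟨k, _, rfl⟩
      simp
  | cons x xs ih =>
    have hsub' : ∀ y ∈ xs, y ∈ l := fun y hy => hsub y (List.mem_cons_of_mem _ hy)
    have hx : x ∈ l := hsub x (List.mem_cons_self)
    have hcount : ∀ k : Char, ((x :: xs).count k : Int)
        = (xs.count k : Int) + (if k == x then (1 : Int) else 0) := by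
      intro k
      rw [List.count_cons]
      by_cases h : k = x
      · simp [h]
      · simp [h]
        exact fun hh => h hh.symm
    have hmap : ((l.filter p).map (fun k => ((x :: xs).count k : Int)))
        = ((l.filter p).map (fun k => (xs.count k : Int) + (if k == x then (1:Int) else 0))) := by
      exact List.map_congr_left (fun k _ => hcount k)
    rw [hmap]
    have hsplit :
        ((l.filter p).map (fun k => (xs.count k : Int) + (if k == x then (1:Int) else 0))).sum
        = ((l.filter p).map (fun k => (xs.count k : Int))).sum
          + ((l.filter p).map (fun k => if k == x then (1:Int) else 0)).sum := by
      induction (l.filter p) with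
      | nil => simp
      | cons a m ihm => simp only [List.map_cons, List.sum_cons, ihm]; ring
    rw [hsplit, ih hsub', sum_ind x _ (List.Nodup.filter p hl)]
    rw [List.countP_cons]
    by_cases hp : p x
    · have : x ∈ l.filter p := List.mem_filter.mpr ⟨hx, hp⟩
      simp [hp, this]
    · have : x ∉ l.filter p := fun h => hp (List.mem_filter.mp h).2
      simp [hp, this]

-- digits are never letters: the two ASCII ranges are disjoint
theorem dig_not_al (c : Char) (h : pvIsDig c = true) : pvIsAl c = false := by
  simp only [pvIsDig, Bool.and_eq_true, decide_eq_true_eq] at h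
  simp only [pvIsAl, Bool.or_eq_false_iff, Bool.and_eq_false_iff, decide_eq_false_iff_not]
  simp only [Char.le_def, UInt32.le_iff_toNat_le] at h ⊢
  have h0 : ('0').val.toNat = 48 := rfl
  have h9 : ('9').val.toNat = 57 := rfl
  have ha : ('a').val.toNat = 97 := rfl
  have hA : ('A').val.toNat = 65 := rfl
  omega

-- hence A's elif guard is redundant on the digit branch
theorem countP_dig (xs : List Char) :
    xs.countP (fun c => !pvIsAl c && pvIsDig c) = xs.countP pvIsDig := by
  apply List.countP_congr
  intro c _
  by_cases hd : pvIsDig c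
  · simp [hd, dig_not_al c hd]
  · simp [hd]

theorem alt_eq (s : String) :
    count_alphabets_digits_alt s
      = ((s.toList.countP pvIsAl : Int), (s.toList.countP pvIsDig : Int)) := by
  have key : ∀ p : Char → Bool,
      (((PySem.Dict.counter s.toList).items.filter (fun kv => p kv.1)).map
          (fun kv => kv.2)).sum
        = (s.toList.countP p : Int) := by
    intro p
    rw [PySem.Dict.items_counter, List.filter_map, List.map_map]
    have h1 : ((fun kv : Char × Int => p kv.1) ∘
        (fun k => (k, (s.toList.count k : Int)))) = p := rfl
    have h2 : ((fun kv : Char × Int => kv.2) ∘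
        (fun k => (k, (s.toList.count k : Int))))
        = fun k => (s.toList.count k : Int) := rfl
    rw [h1, h2]
    exact sum_count p _ _ (PySem.Set.nodup_ofList _)
      (fun x hx => (PySem.Set.mem_ofList _ _).mpr hx)
  simp only [count_alphabets_digits_alt, PySem.Dict.foldl_insert_getD_add_one_eq_counter]
  rw [key pvIsAl, key pvIsDig]

-- ===== VERDICT (by name: the statement is the Claim_ definition above) =====
theorem count_alphabets_digits_spec : Claim_equal_count_alphabets_digits := by
  intro s _
  unfold Spec_count_alphabets_digits count_alphabets_digits
  rw [foldA_eq, alt_eq, countP_dig]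
  simp
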